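-- pv_equiv track=rewrite | github.com/b4its/golytics | generate/generateDtPredict.py | get_business_type
-- ===== SOURCE A (Python) =====
-- def get_business_type(business_name):
--     mapping = {
--         "F&B": ["Rasa Pagi", "Sambal Senja", "Dapur Loka", "Teh & Cerita", "Jajan Jadoel"],
--         "Digital & Teknologi": ["Jejak Digital", "Koding Karya", "Data Cerah", "BitNusa", "NusaCloud"],
--         "Retail & Toko Serba Ada": ["Toko PastiAda", "Langgananku", "RumaRaya", "Harga Loka", "Belanja Pintar"],
--         "Fashion & Gaya Hidup": ["Bumi Perca", "Hijab Pelita", "Langit Busana", "Rancak Raya", "Lini Rupa"],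
--         "Kreatif & Desain": ["Studio Karsa", "Citra Akar", "IdeLokal", "Bentuk Cerita", "Warna Rasa"],
--         "Kesehatan & Kecantikan": ["Sehat Sentosa", "Rupa Sejiwa", "Laras Care", "Klinik Asa", "CantikNusa"],
--         "Pendidikan & Pelatihan": ["Langkah Cerah", "Pelita Cita", "Kelas Rakyat", "Asa Cendekia", "Bimbingan Cerita"],
--         "Travel & Pariwisata": ["Mitra Langit", "Jalan Jelajah", "NusaTrip", "Langkah Loka", "Tamasya Cerah"],
--         "Kerajinan & Produk Lokal": ["Kriya Kita", "Rupa Nusantara", "Sentra Loka", "Karya Warna", "Loka Bambu"],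
--         "Properti & Kontraktor": ["Rancang Sejahtera", "Lahan Asa", "Rumah Kita", "Bangun Cerita", "Tata Griya"],
--     }
--     for jenis, names in mapping.items():
--         if business_name in names:
--             return jenis
--     return "Lainnya"
-- ===== SOURCE B (Python) =====
-- # Category of names[i] is cats[i//5]: the original mapping lists exactly 5 names per
-- # category, in order, so one flat name list plus index arithmetic replaces the loop.
-- _NAMES = [
--     'Rasa Pagi',
--     'Sambal Senja',
--     'Dapur Loka',
--     'Teh & Cerita',
--     'Jajan Jadoel',
--     'Jejak Digital',
--     'Koding Karya',
--     'Data Cerah',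
--     'BitNusa',
--     'NusaCloud',
--     'Toko PastiAda',
--     'Langgananku',
--     'RumaRaya',
--     'Harga Loka',
--     'Belanja Pintar',
--     'Bumi Perca',
--     'Hijab Pelita',
--     'Langit Busana',
--     'Rancak Raya',
--     'Lini Rupa',
--     'Studio Karsa',
--     'Citra Akar',
--     'IdeLokal',
--     'Bentuk Cerita',
--     'Warna Rasa',
--     'Sehat Sentosa',
--     'Rupa Sejiwa',
--     'Laras Care',
--     'Klinik Asa',
--     'CantikNusa',
--     'Langkah Cerah',
--     'Pelita Cita',
--     'Kelas Rakyat',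
--     'Asa Cendekia',
--     'Bimbingan Cerita',
--     'Mitra Langit',
--     'Jalan Jelajah',
--     'NusaTrip',
--     'Langkah Loka',
--     'Tamasya Cerah',
--     'Kriya Kita',
--     'Rupa Nusantara',
--     'Sentra Loka',
--     'Karya Warna',
--     'Loka Bambu',
--     'Rancang Sejahtera',
--     'Lahan Asa',
--     'Rumah Kita',
--     'Bangun Cerita',
--     'Tata Griya',
-- ]
--
-- _CATS = [
--     'F&B',
--     'Digital & Teknologi',
--     'Retail & Toko Serba Ada',
--     'Fashion & Gaya Hidup',
--     'Kreatif & Desain',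
--     'Kesehatan & Kecantikan',
--     'Pendidikan & Pelatihan',
--     'Travel & Pariwisata',
--     'Kerajinan & Produk Lokal',
--     'Properti & Kontraktor',
-- ]
--
--
-- def get_business_type(business_name):
--     try:
--         i = _NAMES.index(business_name)
--     except ValueError:
--         return "Lainnya"
--     return _CATS[i // 5]
-- ===== Notes on version B (the rewrite author's own statement) =====
-- stated objective: alternative
-- what changed: Exploits that the mapping lists exactly 5 names per category in order: B keeps one flat name list and one category list and returns _CATS[_NAMES.index(name) // 5] (ValueError -> "Lainnya"), replacing the per-category loop with membership scans by a single index plus integer arithmetic.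
import Mathlib
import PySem

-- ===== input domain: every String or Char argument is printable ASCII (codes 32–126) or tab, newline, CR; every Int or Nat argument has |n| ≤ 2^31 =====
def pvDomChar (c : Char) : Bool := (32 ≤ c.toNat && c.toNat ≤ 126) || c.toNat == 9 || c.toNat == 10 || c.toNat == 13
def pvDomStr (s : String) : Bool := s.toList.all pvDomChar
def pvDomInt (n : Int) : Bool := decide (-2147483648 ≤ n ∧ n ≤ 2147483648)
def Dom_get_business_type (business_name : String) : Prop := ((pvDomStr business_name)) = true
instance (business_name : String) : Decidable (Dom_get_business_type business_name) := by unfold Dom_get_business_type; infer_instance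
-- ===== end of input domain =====

-- B replaces A's per-category membership-scan loop by one flat name list: category = cats[index // 5] ("alternative").

-- ===== PORT A =====
def pvMapping : List (String × List String) := [
  ("F&B", ["Rasa Pagi", "Sambal Senja", "Dapur Loka", "Teh & Cerita", "Jajan Jadoel"]),
  ("Digital & Teknologi", ["Jejak Digital", "Koding Karya", "Data Cerah", "BitNusa", "NusaCloud"]),
  ("Retail & Toko Serba Ada", ["Toko PastiAda", "Langgananku", "RumaRaya", "Harga Loka", "Belanja Pintar"]),
  ("Fashion & Gaya Hidup", ["Bumi Perca", "Hijab Pelita", "Langit Busana", "Rancak Raya", "Lini Rupa"]),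
  ("Kreatif & Desain", ["Studio Karsa", "Citra Akar", "IdeLokal", "Bentuk Cerita", "Warna Rasa"]),
  ("Kesehatan & Kecantikan", ["Sehat Sentosa", "Rupa Sejiwa", "Laras Care", "Klinik Asa", "CantikNusa"]),
  ("Pendidikan & Pelatihan", ["Langkah Cerah", "Pelita Cita", "Kelas Rakyat", "Asa Cendekia", "Bimbingan Cerita"]),
  ("Travel & Pariwisata", ["Mitra Langit", "Jalan Jelajah", "NusaTrip", "Langkah Loka", "Tamasya Cerah"]),
  ("Kerajinan & Produk Lokal", ["Kriya Kita", "Rupa Nusantara", "Sentra Loka", "Karya Warna", "Loka Bambu"]),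
  ("Properti & Kontraktor", ["Rancang Sejahtera", "Lahan Asa", "Rumah Kita", "Bangun Cerita", "Tata Griya"])]

-- 'for jenis, names in mapping.items(): if business_name in names: return jenis' / fall through to "Lainnya"
def pvLoopA (business_name : String) : List (String × List String) → String
  | [] => "Lainnya"
  | (jenis, names) :: rest =>
      if names.contains business_name then jenis else pvLoopA business_name rest

def get_business_type (business_name : String) : String :=
  pvLoopA business_name pvMapping

-- ===== PORT B =====
-- _NAMES: the 50 names flat, in order (5 per category)
def pvNames : List String := [
  "Rasa Pagi",
  "Sambal Senja",
  "Dapur Loka",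
  "Teh & Cerita",
  "Jajan Jadoel",
  "Jejak Digital",
  "Koding Karya",
  "Data Cerah",
  "BitNusa",
  "NusaCloud",
  "Toko PastiAda",
  "Langgananku",
  "RumaRaya",
  "Harga Loka",
  "Belanja Pintar",
  "Bumi Perca",
  "Hijab Pelita",
  "Langit Busana",
  "Rancak Raya",
  "Lini Rupa",
  "Studio Karsa",
  "Citra Akar",
  "IdeLokal",
  "Bentuk Cerita",
  "Warna Rasa",
  "Sehat Sentosa",
  "Rupa Sejiwa",
  "Laras Care",
  "Klinik Asa",
  "CantikNusa",
  "Langkah Cerah",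
  "Pelita Cita",
  "Kelas Rakyat",
  "Asa Cendekia",
  "Bimbingan Cerita",
  "Mitra Langit",
  "Jalan Jelajah",
  "NusaTrip",
  "Langkah Loka",
  "Tamasya Cerah",
  "Kriya Kita",
  "Rupa Nusantara",
  "Sentra Loka",
  "Karya Warna",
  "Loka Bambu",
  "Rancang Sejahtera",
  "Lahan Asa",
  "Rumah Kita",
  "Bangun Cerita",
  "Tata Griya"]

-- _CATS: the 10 categories, in order
def pvCats : List String := [
  "F&B",
  "Digital & Teknologi",
  "Retail & Toko Serba Ada",
  "Fashion & Gaya Hidup",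
  "Kreatif & Desain",
  "Kesehatan & Kecantikan",
  "Pendidikan & Pelatihan",
  "Travel & Pariwisata",
  "Kerajinan & Produk Lokal",
  "Properti & Kontraktor"]

-- try: i = _NAMES.index(b) / except ValueError: return "Lainnya" / return _CATS[i // 5]
-- index? = list.index (none = ValueError); i is a Nat here and 0 ≤ i ≤ 49, so Python's
-- i // 5 is Nat division and _CATS[i // 5] is in range (the getD default is unreachable).
def get_business_type_alt (business_name : String) : String :=
  match PySem.List.index? pvNames business_name with
  | none => "Lainnya"
  | some i => pvCats.getD (i / 5) "Lainnya"

-- ===== PRECONDITION & SPEC =====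
def Spec_get_business_type (business_name : String) (out : String) : Prop := out = get_business_type_alt business_name
instance (business_name : String) (out : String) : Decidable (Spec_get_business_type business_name out) := by unfold Spec_get_business_type; infer_instance

-- ===== CLAIM =====
def Claim_equal_get_business_type : Prop := ∀ (business_name : String), Dom_get_business_type business_name → Spec_get_business_type business_name (get_business_type business_name)

-- ===== LEMMAS AND PROOFS =====
theorem pv_key (b : String) : get_business_type b = get_business_type_alt b := by
  by_cases h1 : b = "Rasa Pagi"
  · subst h1; rfl
  by_cases h2 : b = "Sambal Senja"
  · subst h2; rfl
  by_cases h3 : b = "Dapur Loka"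
  · subst h3; rfl
  by_cases h4 : b = "Teh & Cerita"
  · subst h4; rfl
  by_cases h5 : b = "Jajan Jadoel"
  · subst h5; rfl
  by_cases h6 : b = "Jejak Digital"
  · subst h6; rfl
  by_cases h7 : b = "Koding Karya"
  · subst h7; rfl
  by_cases h8 : b = "Data Cerah"
  · subst h8; rfl
  by_cases h9 : b = "BitNusa"
  · subst h9; rfl
  by_cases h10 : b = "NusaCloud"
  · subst h10; rfl
  by_cases h11 : b = "Toko PastiAda"
  · subst h11; rfl
  by_cases h12 : b = "Langgananku"
  · subst h12; rfl
  by_cases h13 : b = "RumaRaya"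
  · subst h13; rfl
  by_cases h14 : b = "Harga Loka"
  · subst h14; rfl
  by_cases h15 : b = "Belanja Pintar"
  · subst h15; rfl
  by_cases h16 : b = "Bumi Perca"
  · subst h16; rfl
  by_cases h17 : b = "Hijab Pelita"
  · subst h17; rfl
  by_cases h18 : b = "Langit Busana"
  · subst h18; rfl
  by_cases h19 : b = "Rancak Raya"
  · subst h19; rfl
  by_cases h20 : b = "Lini Rupa"
  · subst h20; rfl
  by_cases h21 : b = "Studio Karsa"
  · subst h21; rfl
  by_cases h22 : b = "Citra Akar"
  · subst h22; rfl
  by_cases h23 : b = "IdeLokal"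
  · subst h23; rfl
  by_cases h24 : b = "Bentuk Cerita"
  · subst h24; rfl
  by_cases h25 : b = "Warna Rasa"
  · subst h25; rfl
  by_cases h26 : b = "Sehat Sentosa"
  · subst h26; rfl
  by_cases h27 : b = "Rupa Sejiwa"
  · subst h27; rfl
  by_cases h28 : b = "Laras Care"
  · subst h28; rfl
  by_cases h29 : b = "Klinik Asa"
  · subst h29; rfl
  by_cases h30 : b = "CantikNusa"
  · subst h30; rfl
  by_cases h31 : b = "Langkah Cerah"
  · subst h31; rfl
  by_cases h32 : b = "Pelita Cita"
  · subst h32; rfl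
  by_cases h33 : b = "Kelas Rakyat"
  · subst h33; rfl
  by_cases h34 : b = "Asa Cendekia"
  · subst h34; rfl
  by_cases h35 : b = "Bimbingan Cerita"
  · subst h35; rfl
  by_cases h36 : b = "Mitra Langit"
  · subst h36; rfl
  by_cases h37 : b = "Jalan Jelajah"
  · subst h37; rfl
  by_cases h38 : b = "NusaTrip"
  · subst h38; rfl
  by_cases h39 : b = "Langkah Loka"
  · subst h39; rfl
  by_cases h40 : b = "Tamasya Cerah"
  · subst h40; rfl
  by_cases h41 : b = "Kriya Kita"
  · subst h41; rfl
  by_cases h42 : b = "Rupa Nusantara"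
  · subst h42; rfl
  by_cases h43 : b = "Sentra Loka"
  · subst h43; rfl
  by_cases h44 : b = "Karya Warna"
  · subst h44; rfl
  by_cases h45 : b = "Loka Bambu"
  · subst h45; rfl
  by_cases h46 : b = "Rancang Sejahtera"
  · subst h46; rfl
  by_cases h47 : b = "Lahan Asa"
  · subst h47; rfl
  by_cases h48 : b = "Rumah Kita"
  · subst h48; rfl
  by_cases h49 : b = "Bangun Cerita"
  · subst h49; rfl
  by_cases h50 : b = "Tata Griya"
  · subst h50; rfl
  have hnm : b ∉ pvNames := by simp [pvNames, h1, h2, h3, h4, h5, h6, h7, h8, h9, h10, h11, h12, h13, h14, h15, h16, h17, h18, h19, h20, h21, h22, h23, h24, h25, h26, h27, h28, h29, h30, h31, h32, h33, h34, h35, h36, h37, h38, h39, h40, h41, h42, h43, h44, h45, h46, h47, h48, h49, h50]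
  have hidx := (PySem.List.index?_eq_none_iff pvNames b).mpr hnm
  have hA : get_business_type b = "Lainnya" := by
    simp [get_business_type, pvLoopA, pvMapping, List.contains_eq_mem,
          h1, h2, h3, h4, h5, h6, h7, h8, h9, h10, h11, h12, h13, h14, h15, h16, h17, h18, h19, h20, h21, h22, h23, h24, h25, h26, h27, h28, h29, h30, h31, h32, h33, h34, h35, h36, h37, h38, h39, h40, h41, h42, h43, h44, h45, h46, h47, h48, h49, h50]
  rw [hA]
  unfold get_business_type_alt
  rw [hidx]

-- ===== VERDICT =====
theorem get_business_type_spec : Claim_equal_get_business_type := by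
  intro b _
  exact pv_key b
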